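-- pv_equiv track=rewrite | github.com/Menn0H/SudokuSolver | sudoku.py | getSquareNum
-- ===== SOURCE A (Python) =====
-- def getSquareNum( x, y):
--     x1, x2, y1, y2= [0,3,6], [2,5,8], [0,3,6], [2,5,8]
--     count = 1
--
--     for i in range(3):
--         for j in range(3):
--             if x >= x1[i] and y >= y1[j] and x <= x2[i] and y <= y2[j]:
--                 return count
--             else:
--                 count += 1
-- ===== SOURCE B (Python) =====
-- def _band(c):
--     # sub-square band index: 0 for 0..2, 1 for 3..5, 2 for 6..8, else None
--     if 0 <= c <= 8:
--         return c // 3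
--     return None
--
-- def getSquareNum(x, y):
--     bx = _band(x)
--     by = _band(y)
--     if bx is None or by is None:
--         return None
--     return bx * 3 + by + 1
-- ===== Notes on version B (the rewrite author's own statement) =====
-- stated objective: simpler
-- what changed: Replaces the 3x3 nested scan over band-boundary lists with two independent 1-D band classifications (c//3 when 0<=c<=8, else None) combined as bx*3+by+1.
import Mathlib
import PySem

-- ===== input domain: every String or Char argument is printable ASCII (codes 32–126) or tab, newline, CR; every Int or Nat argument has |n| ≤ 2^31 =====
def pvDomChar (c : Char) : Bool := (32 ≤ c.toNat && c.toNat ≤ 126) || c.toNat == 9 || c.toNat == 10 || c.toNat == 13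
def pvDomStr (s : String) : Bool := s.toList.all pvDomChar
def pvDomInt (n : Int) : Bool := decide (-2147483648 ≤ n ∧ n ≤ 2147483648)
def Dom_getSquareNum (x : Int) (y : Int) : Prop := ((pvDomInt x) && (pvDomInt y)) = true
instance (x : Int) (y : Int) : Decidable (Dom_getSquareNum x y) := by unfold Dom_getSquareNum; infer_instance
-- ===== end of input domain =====

-- B replaces A's 3x3 nested scan with two independent 1-D band classifications (simpler decomposition).

-- ===== PORT A =====
-- inner 'for j in range(3)' loop: returns (early-return value, updated count)
def pvALoopJ (x y xi1 xi2 : Int) (y1 y2 : List Int) (count : Int) : List Int → Option Int × Int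
  | [] => (none, count)
  | j :: js =>
    match PySem.List.pyGet? y1 j, PySem.List.pyGet? y2 j with
    | some yj1, some yj2 =>
      if x ≥ xi1 ∧ y ≥ yj1 ∧ x ≤ xi2 ∧ y ≤ yj2 then (some count, count)
      else pvALoopJ x y xi1 xi2 y1 y2 (count + 1) js
    | _, _ => (none, count)   -- IndexError cannot occur: j ∈ [0,2], lists have 3 elements

-- outer 'for i in range(3)' loop
def pvALoopI (x y : Int) (x1 x2 y1 y2 : List Int) (count : Int) : List Int → Option Int
  | [] => none
  | i :: is =>
    match PySem.List.pyGet? x1 i, PySem.List.pyGet? x2 i with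
    | some xi1, some xi2 =>
      match pvALoopJ x y xi1 xi2 y1 y2 count (PySem.List.pyRange 0 3 1) with
      | (some r, _) => some r
      | (none, c) => pvALoopI x y x1 x2 y1 y2 c is
    | _, _ => none            -- IndexError cannot occur

def getSquareNum (x : Int) (y : Int) : Option Int :=
  pvALoopI x y [0, 3, 6] [2, 5, 8] [0, 3, 6] [2, 5, 8] 1 (PySem.List.pyRange 0 3 1)

-- ===== PORT B =====
def pvBand (c : Int) : Option Int :=
  if 0 ≤ c ∧ c ≤ 8 then some (PySem.Int.floordiv c 3) else none

def getSquareNum_alt (x : Int) (y : Int) : Option Int :=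
  match pvBand x, pvBand y with
  | some bx, some byy => some (bx * 3 + byy + 1)
  | _, _ => none

-- ===== PRECONDITION & SPEC =====
def Spec_getSquareNum (x : Int) (y : Int) (out : Option Int) : Prop := out = getSquareNum_alt x y
instance (x : Int) (y : Int) (out : Option Int) : Decidable (Spec_getSquareNum x y out) := by unfold Spec_getSquareNum; infer_instance

-- ===== CLAIM (what is proved, stated in full; the proofs are below) =====
def Claim_equal_getSquareNum : Prop := ∀ (x : Int) (y : Int), Dom_getSquareNum x y → Spec_getSquareNum x y (getSquareNum x y)

-- ===== LEMMAS AND PROOFS =====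


-- evaluation of the inner j-loop on the concrete literal lists
theorem pvLoopJ_eval (x y xi1 xi2 c : Int) :
    pvALoopJ x y xi1 xi2 [0, 3, 6] [2, 5, 8] c (PySem.List.pyRange 0 3 1) =
      if x ≥ xi1 ∧ y ≥ 0 ∧ x ≤ xi2 ∧ y ≤ 2 then (some c, c)
      else if x ≥ xi1 ∧ y ≥ 3 ∧ x ≤ xi2 ∧ y ≤ 5 then (some (c + 1), c + 1)
      else if x ≥ xi1 ∧ y ≥ 6 ∧ x ≤ xi2 ∧ y ≤ 8 then (some (c + 1 + 1), c + 1 + 1)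
      else (none, c + 1 + 1 + 1) := by
  have h : PySem.List.pyRange 0 3 1 = [0, 1, 2] := by decide
  rw [h]
  simp only [pvALoopJ, PySem.List.pyGet?, PySem.List.pyIdx?]
  norm_num [show ((2:Int).toNat) = 2 from rfl, show ((1:Int).toNat) = 1 from rfl]

-- ===== VERDICT (by name: the statement is the Claim_ definition above) =====
theorem getSquareNum_spec : Claim_equal_getSquareNum := by
  intro x y _
  unfold Spec_getSquareNum getSquareNum getSquareNum_alt pvBand
  have h : PySem.List.pyRange 0 3 1 = [0, 1, 2] := by decide
  rw [h]
  simp only [pvALoopI, PySem.List.pyGet?, PySem.List.pyIdx?]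
  norm_num [pvLoopJ_eval, show ((2:Int).toNat) = 2 from rfl, show ((1:Int).toNat) = 1 from rfl,
    PySem.Int.floordiv_eq_ediv_of_pos (b := 3) (by norm_num : (0:Int) < 3)]
  split_ifs <;>
    first
      | rfl
      | omega
      | (simp only [Option.some.injEq]; omega)
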